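-- pv_equiv track=rewrite | github.com/Jdrice72901/DSBA-6211-Stack-overflow-Survey-Analysis | src/compensation_modeling.py | tech_flag_name
-- ===== SOURCE A (Python) =====
-- def tech_flag_name(column, tech):
--     safe = (
--         tech.lower()
--         .replace('++', '_plusplus_')
--         .replace('+', '_plus_')
--         .replace('#', '_sharp_')
--         .replace('.', '_dot_')
--         .replace('/', '_slash_')
--         .replace('&', '_and_')
--         .replace(' ', '_')
--     )
--     safe = ''.join(ch if ch.isalnum() or ch == '_' else '_' for ch in safe)
--     safe = '_'.join(part for part in safe.split('_') if part)
--     return f'{column}_{safe}'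
-- ===== SOURCE B (Python) =====
-- def tech_flag_name(column, tech):
--     # One left-to-right scan building words, instead of A's chain of .replace passes.
--     s = tech.lower()
--     n = len(s)
--     words = []
--     cur = []
--     i = 0
--     while i < n:
--         ch = s[i]
--         if ch == '+':
--             if cur:
--                 words.append(''.join(cur))
--                 cur = []
--             if i + 1 < n and s[i + 1] == '+':
--                 words.append('plusplus')
--                 i += 2
--             else:
--                 words.append('plus')
--                 i += 1
--             continue
--         if ch == '#' or ch == '.' or ch == '/' or ch == '&':
--             if cur:
--                 words.append(''.join(cur))
--                 cur = []
--             words.append({'#': 'sharp', '.': 'dot', '/': 'slash', '&': 'and'}[ch])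
--         elif ch.isalnum():
--             cur.append(ch)
--         else:
--             if cur:
--                 words.append(''.join(cur))
--                 cur = []
--         i += 1
--     if cur:
--         words.append(''.join(cur))
--     return f"{column}_{'_'.join(words)}"
-- ===== Notes on version B (the rewrite author's own statement) =====
-- stated objective: alternative
-- what changed: Replaced A's chain of seven sequential full-string .replace passes plus a character-map pass plus split/filter/join by a single left-to-right scan with one-character lookahead that builds the word list directly and joins it once.
import Mathlib
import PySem

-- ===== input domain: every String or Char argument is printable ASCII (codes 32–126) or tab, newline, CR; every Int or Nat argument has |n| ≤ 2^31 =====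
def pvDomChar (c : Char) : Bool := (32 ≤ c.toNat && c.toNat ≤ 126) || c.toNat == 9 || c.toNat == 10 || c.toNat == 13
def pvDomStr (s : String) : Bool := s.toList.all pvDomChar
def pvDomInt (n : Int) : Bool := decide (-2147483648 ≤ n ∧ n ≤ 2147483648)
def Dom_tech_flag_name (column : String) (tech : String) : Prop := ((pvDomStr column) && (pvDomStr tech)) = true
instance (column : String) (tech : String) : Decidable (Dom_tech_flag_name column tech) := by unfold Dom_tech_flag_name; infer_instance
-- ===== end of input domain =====

-- B replaces A's chain of sequential .replace passes by ONE left-to-right scan that builds the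
-- word list directly; same return value, different decomposition (return-value equivalence only).

-- ===== PORT A =====
def tech_flag_name (column : String) (tech : String) : String :=
  let s0 := PySem.Chars.lower tech.toList
  let s1 := PySem.Chars.replace s0 "++".toList "_plusplus_".toList
  let s2 := PySem.Chars.replace s1 "+".toList "_plus_".toList
  let s3 := PySem.Chars.replace s2 "#".toList "_sharp_".toList
  let s4 := PySem.Chars.replace s3 ".".toList "_dot_".toList
  let s5 := PySem.Chars.replace s4 "/".toList "_slash_".toList
  let s6 := PySem.Chars.replace s5 "&".toList "_and_".toList
  let s7 := PySem.Chars.replace s6 " ".toList "_".toList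
  let safe := PySem.Chars.join []
    (s7.map (fun ch => [if PySem.Chars.isalnum ch || ch == '_' then ch else '_']))
  let parts := PySem.Chars.splitOn safe "_".toList
  let safe2 := PySem.Chars.join "_".toList (parts.filter (fun p => !p.isEmpty))
  String.mk (column.toList ++ '_' :: safe2)

-- ===== PORT B =====
def tfnFlush (cur : List Char) : List (List Char) := if cur.isEmpty then [] else [cur]

def tfnGo : List Char → List Char → List (List Char)
  | [], cur => tfnFlush cur
  | '+' :: '+' :: t, cur => tfnFlush cur ++ "plusplus".toList :: tfnGo t []
  | '+' :: t, cur => tfnFlush cur ++ "plus".toList :: tfnGo t []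
  | c :: t, cur =>
      if c = '#' then tfnFlush cur ++ "sharp".toList :: tfnGo t []
      else if c = '.' then tfnFlush cur ++ "dot".toList :: tfnGo t []
      else if c = '/' then tfnFlush cur ++ "slash".toList :: tfnGo t []
      else if c = '&' then tfnFlush cur ++ "and".toList :: tfnGo t []
      else if PySem.Chars.isalnum c then tfnGo t (cur ++ [c])
      else tfnFlush cur ++ tfnGo t []

def tech_flag_name_alt (column : String) (tech : String) : String :=
  String.mk (column.toList ++ '_' ::
    PySem.Chars.join "_".toList (tfnGo (PySem.Chars.lower tech.toList) []))

-- ===== PRECONDITION & SPEC =====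
def Spec_tech_flag_name (column : String) (tech : String) (out : String) : Prop := out = tech_flag_name_alt column tech
instance (column : String) (tech : String) (out : String) : Decidable (Spec_tech_flag_name column tech out) := by unfold Spec_tech_flag_name; infer_instance

-- ===== CLAIM (what is proved, stated in full; the proofs are below) =====
def Claim_equal_tech_flag_name : Prop := ∀ (column : String) (tech : String), Dom_tech_flag_name column tech → Spec_tech_flag_name column tech (tech_flag_name column tech)

-- ===== LEMMAS AND PROOFS =====

-- A single-character replace, written structurally.
def rep1 (a : Char) (new : List Char) : List Char → List Char
  | [] => []
  | c :: t => if c = a then new ++ rep1 a new t else c :: rep1 a new t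

-- The "++" replace, written structurally (leftmost, non-overlapping).
def rep2 (new : List Char) : List Char → List Char
  | '+' :: '+' :: t => new ++ rep2 new t
  | c :: t => c :: rep2 new t
  | [] => []

-- The six single-character replaces of A, composed in A's order.
def comps (l : List Char) : List Char :=
  rep1 ' ' "_".toList (rep1 '&' "_and_".toList (rep1 '/' "_slash_".toList
    (rep1 '.' "_dot_".toList (rep1 '#' "_sharp_".toList (rep1 '+' "_plus_".toList l)))))

-- A's whole replace chain, structurally.
def comp (s : List Char) : List Char := comps (rep2 "_plusplus_".toList s)

-- A's character sanitation map.
def mc (ch : Char) : Char := if PySem.Chars.isalnum ch || ch == '_' then ch else '_'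

-- split on '_' with a reversed current-piece accumulator (shape of Chars.splitOn.go).
def split1 : List Char → List Char → List (List Char)
  | [], cur => [cur.reverse]
  | c :: t, cur => if c = '_' then cur.reverse :: split1 t [] else split1 t (c :: cur)

-- maximal runs of non-'_' characters (= split on '_' with empty pieces dropped).
def runsAux : List Char → List Char → List (List Char)
  | [], cur => if cur.isEmpty then [] else [cur.reverse]
  | c :: t, cur =>
      if c = '_' then (if cur.isEmpty then runsAux t [] else cur.reverse :: runsAux t [])
      else runsAux t (c :: cur)

lemma rep1_go (a : Char) (new : List Char) :
    ∀ (fuel : Nat) (l acc : List Char), l.length ≤ fuel →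
      PySem.Chars.replace.go [a] new fuel l acc = acc.reverse ++ rep1 a new l := by
  intro fuel
  induction fuel with
  | zero =>
    intro l acc h
    rw [PySem.Chars.replace.go]
    cases l with
    | nil => simp [rep1]
    | cons c t => simp at h
  | succ f ih =>
    intro l acc h
    cases l with
    | nil => rw [PySem.Chars.replace.go]; simp [rep1]; omega
    | cons c t =>
      rw [PySem.Chars.replace.go]
      by_cases hc : c = a
      · simp [hc, List.isPrefixOf, rep1, ih t _ (by simpa using Nat.le_of_succ_le_succ h)]
      · simp [rep1, hc, List.isPrefixOf, show (a == c) = false by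
          simp; exact fun h' => hc h'.symm,
          ih t _ (by simpa using Nat.le_of_succ_le_succ h)]

lemma replace_eq_rep1 (a : Char) (new : List Char) (s : List Char) :
    PySem.Chars.replace s [a] new = rep1 a new s := by
  rw [PySem.Chars.replace]
  simp [List.isEmpty]
  exact rep1_go a new s.length s [] le_rfl

lemma rep2_go (new : List Char) :
    ∀ (fuel : Nat) (l acc : List Char), l.length ≤ fuel →
      PySem.Chars.replace.go ['+', '+'] new fuel l acc = acc.reverse ++ rep2 new l := by
  intro fuel
  induction fuel with
  | zero =>
    intro l acc h
    rw [PySem.Chars.replace.go]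
    cases l with
    | nil => simp [rep2]
    | cons c t => simp at h
  | succ f ih =>
    intro l acc h
    cases l with
    | nil => rw [PySem.Chars.replace.go]; simp [rep2]; omega
    | cons c t =>
      rw [PySem.Chars.replace.go]
      by_cases hc : c = '+'
      · subst hc
        cases t with
        | nil => simp [List.isPrefixOf, rep2, ih [] _ (by simp)]
        | cons d t2 =>
          by_cases hd : d = '+'
          · subst hd
            simp [List.isPrefixOf, rep2, ih t2 _ (by simp at h ⊢; omega)]
          · simp [List.isPrefixOf, rep2, hd, show ('+' == d) = false by
              simp; exact fun h' => hd h'.symm,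
              ih (d :: t2) _ (by simp at h ⊢; omega)]
      · simp [List.isPrefixOf, rep2, hc, show ('+' == c) = false by
          simp; exact fun h' => hc h'.symm,
          ih t _ (by simp at h ⊢; omega)]

lemma replace_eq_rep2 (new : List Char) (s : List Char) :
    PySem.Chars.replace s ['+', '+'] new = rep2 new s := by
  rw [PySem.Chars.replace]
  simp [List.isEmpty]
  exact rep2_go new s.length s [] le_rfl

lemma rep1_append (a : Char) (new : List Char) (x y : List Char) :
    rep1 a new (x ++ y) = rep1 a new x ++ rep1 a new y := by
  induction x with
  | nil => simp [rep1]
  | cons c t ih => simp [rep1, ih]; split <;> simp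

lemma comps_append (x y : List Char) : comps (x ++ y) = comps x ++ comps y := by
  simp [comps, rep1_append]

lemma splitOn_go (fuel : Nat) :
    ∀ (l cur : List Char) (acc : List (List Char)), l.length ≤ fuel →
      PySem.Chars.splitOn.go ['_'] fuel l cur acc = acc.reverse ++ split1 l cur := by
  induction fuel with
  | zero =>
    intro l cur acc h
    rw [PySem.Chars.splitOn.go]
    cases l with
    | nil => simp [split1]
    | cons c t => simp at h
  | succ f ih =>
    intro l cur acc h
    cases l with
    | nil => rw [PySem.Chars.splitOn.go]; simp [split1]; omega
    | cons c t =>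
      rw [PySem.Chars.splitOn.go]
      by_cases hc : c = '_'
      · simp [hc, List.isPrefixOf, split1, ih t _ _ (by simpa using Nat.le_of_succ_le_succ h)]
      · simp [split1, hc, List.isPrefixOf, show ('_' == c) = false by
          simp; exact fun h' => hc h'.symm,
          ih t _ _ (by simpa using Nat.le_of_succ_le_succ h)]

lemma splitOn_eq_split1 (s : List Char) :
    PySem.Chars.splitOn s ['_'] = split1 s [] := by
  rw [PySem.Chars.splitOn]
  exact splitOn_go (s.length + 1) s [] [] (by omega)

lemma filter_split1 (m : List Char) : ∀ cur,
    (split1 m cur).filter (fun p => !p.isEmpty) = runsAux m cur := by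
  induction m with
  | nil =>
    intro cur
    simp [split1, runsAux, List.filter]
    cases cur <;> simp
  | cons c t ih =>
    intro cur
    by_cases hc : c = '_'
    · simp [split1, runsAux, hc, List.filter, ih]
      cases cur <;> simp
    · simp [split1, runsAux, hc, ih]

-- comp: structural description of A's replace chain
lemma comp_nil : comp [] = [] := by decide

lemma comp_pp (t : List Char) :
    comp ('+' :: '+' :: t) = '_' :: "plusplus".toList ++ '_' :: comp t := by
  unfold comp
  rw [show rep2 "_plusplus_".toList ('+' :: '+' :: t)
        = "_plusplus_".toList ++ rep2 "_plusplus_".toList t from by simp [rep2]]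
  rw [comps_append]
  rw [show comps "_plusplus_".toList = '_' :: "plusplus".toList ++ ['_'] from by decide]
  simp

lemma comp_cons (c : Char) (t : List Char) (h : c ≠ '+') :
    comp (c :: t) = comps [c] ++ comp t := by
  unfold comp
  rw [show rep2 "_plusplus_".toList (c :: t) = c :: rep2 "_plusplus_".toList t from by
    simp [rep2, h]]
  rw [show (c :: rep2 "_plusplus_".toList t) = [c] ++ rep2 "_plusplus_".toList t from rfl]
  rw [comps_append]

lemma comp_plus (t : List Char) (h : ∀ t', t ≠ '+' :: t') :
    comp ('+' :: t) = '_' :: "plus".toList ++ '_' :: comp t := by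
  unfold comp
  have h2 : rep2 "_plusplus_".toList ('+' :: t) = '+' :: rep2 "_plusplus_".toList t := by
    cases t with
    | nil => simp [rep2]
    | cons d t2 =>
      have hd : d ≠ '+' := fun hd => h t2 (by rw [hd])
      simp [rep2, hd]
  rw [h2, show ('+' :: rep2 "_plusplus_".toList t) = ['+'] ++ rep2 "_plusplus_".toList t from rfl,
    comps_append, show comps ['+'] = '_' :: "plus".toList ++ ['_'] from by decide]
  simp

lemma comp_special (c : Char) (w : List Char) (hne : c ≠ '+')
    (hv : comps [c] = '_' :: w ++ ['_']) (t : List Char) :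
    comp (c :: t) = '_' :: w ++ '_' :: comp t := by
  rw [comp_cons c t hne, hv]; simp

lemma comps_single (c : Char) (h1 : c ≠ '#') (h2 : c ≠ '.') (h3 : c ≠ '/')
    (h4 : c ≠ '&') (h5 : c ≠ ' ') (h6 : c ≠ '+') : comps [c] = [c] := by
  simp [comps, rep1, h1, h2, h3, h4, h5, h6]

-- runsAux: consuming a separator and consuming a word
lemma runsAux_emit (rest cur : List Char) :
    runsAux ('_' :: rest) cur = (if cur.isEmpty then [] else [cur.reverse]) ++ runsAux rest [] := by
  simp [runsAux]; split <;> simp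

lemma runsAux_word (word : List Char) (hall : ∀ c ∈ word, c ≠ '_') :
    ∀ (rest cur : List Char), runsAux (word ++ rest) cur = runsAux rest (word.reverse ++ cur) := by
  induction word with
  | nil => simp
  | cons c t ih =>
    intro rest cur
    have hc : c ≠ '_' := hall c (List.mem_cons_self ..)
    simp only [List.cons_append, runsAux, if_neg hc]
    rw [ih (fun d hd => hall d (List.mem_cons_of_mem _ hd)) rest (c :: cur)]
    simp

lemma flush_reverse (cur : List Char) :
    (if cur.reverse.isEmpty then ([] : List (List Char)) else [cur.reverse.reverse]) = tfnFlush cur := by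
  cases cur <;> simp [tfnFlush]

lemma runsAux_token (word : List Char) (hw : word ≠ []) (hall : ∀ c ∈ word, c ≠ '_')
    (rest cur : List Char) :
    runsAux ('_' :: word ++ '_' :: rest) cur.reverse
      = tfnFlush cur ++ word :: runsAux rest [] := by
  rw [show ('_' :: word ++ '_' :: rest) = '_' :: (word ++ '_' :: rest) from rfl]
  rw [runsAux_emit, runsAux_word word hall ('_' :: rest) [], runsAux_emit]
  simp [hw, tfnFlush]

lemma isalnum_facts (c : Char) (h : PySem.Chars.isalnum c = true) :
    c ≠ ' ' ∧ c ≠ '_' := by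
  constructor <;> rintro rfl <;> exact absurd h (by decide)

lemma mc_of_not_alnum (c : Char) (h : ¬ PySem.Chars.isalnum c = true) : mc c = '_' := by
  unfold mc
  by_cases hu : c = '_'
  · simp [hu]
  · simp [h, hu]

lemma map_mc_pp : List.map mc "plusplus".toList = "plusplus".toList := by decide
lemma map_mc_plus : List.map mc "plus".toList = "plus".toList := by decide
lemma map_mc_sharp : List.map mc "sharp".toList = "sharp".toList := by decide
lemma map_mc_dot : List.map mc "dot".toList = "dot".toList := by decide
lemma map_mc_slash : List.map mc "slash".toList = "slash".toList := by decide
lemma map_mc_and : List.map mc "and".toList = "and".toList := by decide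

-- the heart: A's transformed character stream has exactly B's words as its '_'-runs
set_option maxRecDepth 4096 in
lemma main_runs : ∀ (s w : List Char),
    runsAux ((comp s).map mc) w.reverse = tfnGo s w := by
  intro s w
  fun_induction tfnGo s w with
  | case1 cur =>
    cases cur <;> simp [comp_nil, runsAux, tfnFlush]
  | case2 t cur ih =>
    rw [comp_pp]
    simp only [List.map_cons, List.map_append, map_mc_pp, mc_of_not_alnum '_' (by decide)]
    rw [runsAux_token "plusplus".toList (by decide) (by simp)]
    simp only [List.reverse_nil] at ih
    rw [ih]
  | case3 t cur hne ih =>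
    rw [comp_plus t (fun t' ht' => hne t' ht')]
    simp only [List.map_cons, List.map_append, map_mc_plus, mc_of_not_alnum '_' (by decide)]
    rw [runsAux_token "plus".toList (by decide) (by simp)]
    simp only [List.reverse_nil] at ih
    rw [ih]
  | case4 t cur h1 h2 ih =>
    rw [comp_special '#' "sharp".toList (by decide) (by decide) t]
    simp only [List.map_cons, List.map_append, map_mc_sharp, mc_of_not_alnum '_' (by decide)]
    rw [runsAux_token "sharp".toList (by decide) (by simp)]
    simp only [List.reverse_nil] at ih
    rw [ih]
  | case5 t cur h1 h2 h3 ih =>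
    rw [comp_special '.' "dot".toList (by decide) (by decide) t]
    simp only [List.map_cons, List.map_append, map_mc_dot, mc_of_not_alnum '_' (by decide)]
    rw [runsAux_token "dot".toList (by decide) (by simp)]
    simp only [List.reverse_nil] at ih
    rw [ih]
  | case6 t cur h1 h2 h3 h4 ih =>
    rw [comp_special '/' "slash".toList (by decide) (by decide) t]
    simp only [List.map_cons, List.map_append, map_mc_slash, mc_of_not_alnum '_' (by decide)]
    rw [runsAux_token "slash".toList (by decide) (by simp)]
    simp only [List.reverse_nil] at ih
    rw [ih]
  | case7 t cur h1 h2 h3 h4 h5 ih =>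
    rw [comp_special '&' "and".toList (by decide) (by decide) t]
    simp only [List.map_cons, List.map_append, map_mc_and, mc_of_not_alnum '_' (by decide)]
    rw [runsAux_token "and".toList (by decide) (by simp)]
    simp only [List.reverse_nil] at ih
    rw [ih]
  | case8 c t cur h1 h2 h3 h4 h5 h6 halnum ih =>
    have hplus : c ≠ '+' := fun hc => h2 hc
    have hsp : c ≠ ' ' := (isalnum_facts c halnum).1
    have hus : c ≠ '_' := (isalnum_facts c halnum).2
    rw [comp_cons c t hplus, comps_single c h3 h4 h5 h6 hsp hplus]
    simp only [List.map_cons, List.cons_append, List.nil_append]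
    rw [show mc c = c from by simp [mc, halnum]]
    simp only [runsAux, if_neg hus]
    rw [show (c :: cur.reverse) = (cur ++ [c]).reverse from by simp]
    exact ih
  | case9 c t cur h1 h2 h3 h4 h5 h6 halnum ih =>
    have hplus : c ≠ '+' := fun hc => h2 hc
    by_cases hsp : c = ' '
    · subst hsp
      rw [comp_cons ' ' t (by decide), show comps [' '] = ['_'] from by decide]
      simp only [List.map_cons, List.cons_append, List.nil_append,
        mc_of_not_alnum '_' (by decide)]
      rw [runsAux_emit, flush_reverse]
      simp only [List.reverse_nil] at ih
      rw [ih]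
    · rw [comp_cons c t hplus, comps_single c h3 h4 h5 h6 hsp hplus]
      simp only [List.map_cons, List.cons_append, List.nil_append]
      rw [mc_of_not_alnum c halnum]
      rw [runsAux_emit, flush_reverse]
      simp only [List.reverse_nil] at ih
      rw [ih]

theorem tfn_eq (column tech : String) :
    tech_flag_name column tech = tech_flag_name_alt column tech := by
  unfold tech_flag_name tech_flag_name_alt
  set s0 := PySem.Chars.lower tech.toList with hs0
  simp only [show "++".toList = ['+','+'] from rfl, show "+".toList = ['+'] from rfl,
    show "#".toList = ['#'] from rfl, show ".".toList = ['.'] from rfl,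
    show "/".toList = ['/'] from rfl, show "&".toList = ['&'] from rfl,
    show " ".toList = [' '] from rfl, show "_".toList = ['_'] from rfl]
  rw [replace_eq_rep2, replace_eq_rep1, replace_eq_rep1, replace_eq_rep1, replace_eq_rep1,
    replace_eq_rep1, replace_eq_rep1]
  rw [show (rep1 ' ' ['_'] (rep1 '&' "_and_".toList (rep1 '/' "_slash_".toList
      (rep1 '.' "_dot_".toList (rep1 '#' "_sharp_".toList (rep1 '+' "_plus_".toList
      (rep2 "_plusplus_".toList s0))))))) = comp s0 from rfl]
  rw [show (fun ch => [if PySem.Chars.isalnum ch || ch == '_' then ch else '_'])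
      = fun ch => [mc ch] from rfl]
  rw [show (comp s0).map (fun ch => [mc ch]) = ((comp s0).map mc).map (fun x => [x]) from by
    rw [List.map_map]; rfl]
  rw [PySem.Chars.join_nil_singletons]
  rw [splitOn_eq_split1, filter_split1]
  have hm := main_runs s0 []
  simp only [List.reverse_nil] at hm
  rw [hm]

-- ===== VERDICT (by name: the statement is the Claim_ definition above) =====
theorem tech_flag_name_spec : Claim_equal_tech_flag_name := by
  intro column tech _
  unfold Spec_tech_flag_name
  exact tfn_eq column tech
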